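-- pv_equiv track=rewrite | github.com/andyperez125/hack_python_2 | hack_10.py | fn_hack_10
-- ===== SOURCE A (Python) =====
-- def fn_hack_10(input_list):
--     result_list = []
--
--     # Iniciamos  el contador para las claves y valores
--     key_counter = 1
--     value_counter = 2
--
--     # Procesamos  cada diccionario en la lista de entrada .
--     for dic in input_list:
--         new_dic = {}
--         for key in dic:
--             new_dic[str(key_counter)] = str(value_counter)
--             key_counter += 2
--             value_counter += 2
--         result_list.append(new_dic)
--
--     return result_list
-- ===== SOURCE B (Python) =====
-- def fn_hack_10(input_list):
--     # Two-phase: first count entries per dict, then build flat key/value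
--     # tables and chunk them with zip -- no interleaved counters.
--     counts = [sum(1 for _ in d) for d in input_list]
--     total = sum(counts)
--     keys = [str(2 * i + 1) for i in range(total)]
--     vals = [str(2 * i + 2) for i in range(total)]
--     result = []
--     off = 0
--     for c in counts:
--         result.append(dict(zip(keys[off:off + c], vals[off:off + c])))
--         off += c
--     return result
-- ===== Notes on version B (the rewrite author's own statement) =====
-- stated objective: alternative
-- what changed: Replaces the interleaved counter-incrementing nested loops by a two-phase pass: count entries per dict, precompute flat key/value tables from a closed-form index, then chunk them with slices and dict(zip(...)).
import Mathlib
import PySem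

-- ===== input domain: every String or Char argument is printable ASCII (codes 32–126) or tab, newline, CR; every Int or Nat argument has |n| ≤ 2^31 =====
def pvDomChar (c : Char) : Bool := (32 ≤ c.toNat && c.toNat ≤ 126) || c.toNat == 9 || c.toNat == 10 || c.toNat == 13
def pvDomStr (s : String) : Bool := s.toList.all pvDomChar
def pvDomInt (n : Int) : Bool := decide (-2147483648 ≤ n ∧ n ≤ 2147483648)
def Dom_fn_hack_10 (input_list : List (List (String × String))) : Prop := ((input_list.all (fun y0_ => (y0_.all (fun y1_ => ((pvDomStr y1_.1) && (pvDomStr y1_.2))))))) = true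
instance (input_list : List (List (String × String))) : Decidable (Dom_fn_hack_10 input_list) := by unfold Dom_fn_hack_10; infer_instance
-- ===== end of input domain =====

-- B replaces A's interleaved counter-incrementing nested loops by a two-phase pass
-- (count entries per dict, precompute flat key/value tables, chunk them with zip);
-- same cost, different decomposition.


-- ===== PORT A =====
def fn_hack_10 (input_list : List (List (String × String))) : List (List (String × String)) :=
  -- result_list = []; key_counter = 1; value_counter = 2; nested for-loops
  let fin := input_list.foldl
    (fun (st : List (List (String × String)) × Int × Int) dic =>
      let inner := dic.foldl
        (fun (s : PySem.Dict String String × Int × Int) _key =>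
          (s.1.insert (PySem.Int.toStr s.2.1) (PySem.Int.toStr s.2.2), s.2.1 + 2, s.2.2 + 2))
        (PySem.Dict.empty, st.2.1, st.2.2)
      (st.1 ++ [inner.1.items], inner.2.1, inner.2.2))
    ([], 1, 2)
  fin.1

-- ===== PORT B =====
def fn_hack_10_alt (input_list : List (List (String × String))) : List (List (String × String)) :=
  let counts : List Int := input_list.map (fun d => d.foldl (fun n _ => n + 1) (0 : Int))
  let total : Int := counts.sum
  let keys := (PySem.List.pyRange 0 total 1).map (fun i => PySem.Int.toStr (2 * i + 1))
  let vals := (PySem.List.pyRange 0 total 1).map (fun i => PySem.Int.toStr (2 * i + 2))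
  let fin := counts.foldl
    (fun (st : List (List (String × String)) × Int) c =>
      let ks := PySem.List.slice keys (some st.2) (some (st.2 + c))
      let vs := PySem.List.slice vals (some st.2) (some (st.2 + c))
      (st.1 ++ [(PySem.Dict.ofList (ks.zip vs) : PySem.Dict String String).items], st.2 + c))
    ([], 0)
  fin.1

-- ===== PRECONDITION & SPEC =====
def Spec_fn_hack_10 (input_list : List (List (String × String))) (out : List (List (String × String))) : Prop := out = fn_hack_10_alt input_list
instance (input_list : List (List (String × String))) (out : List (List (String × String))) : Decidable (Spec_fn_hack_10 input_list out) := by unfold Spec_fn_hack_10; infer_instance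

-- ===== CLAIM (what is proved, stated in full; the proofs are below) =====
def Claim_equal_fn_hack_10 : Prop := ∀ (input_list : List (List (String × String))), Dom_fn_hack_10 input_list → Spec_fn_hack_10 input_list (fn_hack_10 input_list)

-- ===== LEMMAS AND PROOFS =====

/-- The (key, value) pair produced for global entry index `i`. -/
def pairF (i : Int) : String × String := (PySem.Int.toStr (2 * i + 1), PySem.Int.toStr (2 * i + 2))

/-- The dict (as items) built for a chunk of `c` entries starting at global offset `off`. -/
def chunk (off c : Nat) : List (String × String) :=
  (((List.range c).map (fun j : Nat => pairF ((off : Int) + (j : Int)))).foldl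
    (fun (d : PySem.Dict String String) p => d.insert p.1 p.2) PySem.Dict.empty).items

/-- Common normal form of both programs' outputs. -/
def specGo : List (List (String × String)) → Nat → List (List (String × String))
  | [], _ => []
  | d :: ds, off => chunk off d.length :: specGo ds (off + d.length)

def sumLens (ls : List (List (String × String))) : Nat := (ls.map List.length).sum

lemma drop_range_eq (m n : Nat) : (List.range n).drop m = List.range' m (n - m) := by
  rw [List.range_eq_range', List.drop_range']; norm_num

lemma take_range'_eq (c s n : Nat) : (List.range' s n).take c = List.range' s (min c n) := by
  rw [List.range'_eq_map_range, List.range'_eq_map_range, ← List.map_take, List.take_range]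

lemma A_inner (dic : List (String × String)) (d : PySem.Dict String String) (i : Int) :
    dic.foldl
      (fun (s : PySem.Dict String String × Int × Int) _key =>
        (s.1.insert (PySem.Int.toStr s.2.1) (PySem.Int.toStr s.2.2), s.2.1 + 2, s.2.2 + 2))
      (d, 2 * i + 1, 2 * i + 2)
    = (((List.range dic.length).map (fun j : Nat => pairF (i + (j : Int)))).foldl
        (fun (d : PySem.Dict String String) p => d.insert p.1 p.2) d,
       2 * (i + dic.length) + 1, 2 * (i + dic.length) + 2) := by
  induction dic generalizing d i with
  | nil => simp
  | cons x xs ih =>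
    simp only [List.foldl_cons, List.length_cons, List.range_succ_eq_map, List.map_cons]
    have h1 : (2 : Int) * i + 1 + 2 = 2 * (i + 1) + 1 := by ring
    have h2 : (2 : Int) * i + 2 + 2 = 2 * (i + 1) + 2 := by ring
    rw [h1, h2, ih]
    have hmap : (List.map Nat.succ (List.range xs.length)).map
        (fun j : Nat => pairF (i + (j : Int)))
        = (List.range xs.length).map (fun j : Nat => pairF (i + 1 + (j : Int))) := by
      rw [List.map_map]
      apply List.map_congr_left
      intro a _
      simp only [Function.comp_apply, Nat.succ_eq_add_one]
      congr 1
      push_cast; ring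
    rw [hmap]
    simp only [Prod.mk.injEq]
    refine ⟨?_, ?_, ?_⟩
    · congr 2 <;> norm_num [pairF]
    · push_cast; ring
    · push_cast; ring

lemma A_loop (ls : List (List (String × String))) (acc : List (List (String × String))) (off : Nat) :
    (ls.foldl
      (fun (st : List (List (String × String)) × Int × Int) dic =>
        let inner := dic.foldl
          (fun (s : PySem.Dict String String × Int × Int) _key =>
            (s.1.insert (PySem.Int.toStr s.2.1) (PySem.Int.toStr s.2.2), s.2.1 + 2, s.2.2 + 2))
          (PySem.Dict.empty, st.2.1, st.2.2)
        (st.1 ++ [inner.1.items], inner.2.1, inner.2.2))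
      (acc, 2 * (off : Int) + 1, 2 * (off : Int) + 2)).1
    = acc ++ specGo ls off := by
  induction ls generalizing acc off with
  | nil => simp [specGo]
  | cons d ds ih =>
    simp only [List.foldl_cons, A_inner, specGo]
    have h1 : ((off : Int) + d.length) = ((off + d.length : Nat) : Int) := by push_cast; ring
    rw [h1, ih]
    simp [chunk]

lemma count_eq_length (d : List (String × String)) :
    d.foldl (fun n _ => n + 1) (0 : Int) = (d.length : Int) := by
  have : ∀ (l : List (String × String)) (a : Int),
      l.foldl (fun n _ => n + 1) a = a + l.length := by
    intro l
    induction l with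
    | nil => simp
    | cons x xs ih => intro a; simp [ih]; ring
  simpa using this d 0

lemma chunk_slice (T off c : Nat) (h : off + c ≤ T) :
    ((PySem.List.slice ((PySem.List.pyRange 0 (T : Int) 1).map (fun i => PySem.Int.toStr (2 * i + 1)))
        (some (off : Int)) (some ((off : Int) + (c : Int)))).zip
     (PySem.List.slice ((PySem.List.pyRange 0 (T : Int) 1).map (fun i => PySem.Int.toStr (2 * i + 2)))
        (some (off : Int)) (some ((off : Int) + (c : Int)))))
    = (List.range c).map (fun j : Nat => pairF ((off : Int) + (j : Int))) := by
  have hr : PySem.List.pyRange 0 (T : Int) 1 = (List.range T).map (fun k : Nat => (k : Int)) := by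
    rw [PySem.List.pyRange_one]
    simp
  rw [hr]
  rw [PySem.List.slice_natCast_add, PySem.List.slice_natCast_add]
  simp only [← List.map_drop, ← List.map_take, List.map_map, drop_range_eq, take_range'_eq]
  have hmin : min c (T - off) = c := by omega
  rw [hmin, List.range'_eq_map_range]
  simp only [List.map_map, List.zip_map', pairF]
  apply List.map_congr_left
  intro a _
  simp only [Function.comp_apply, Prod.mk.injEq]
  constructor <;> congr 1

lemma B_loop (ls : List (List (String × String))) (T : Nat)
    (acc : List (List (String × String))) (off : Nat) (h : off + sumLens ls ≤ T) :
    ((ls.map (fun d => d.foldl (fun n _ => n + 1) (0 : Int))).foldl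
      (fun (st : List (List (String × String)) × Int) c =>
        let ks := PySem.List.slice
          ((PySem.List.pyRange 0 (T : Int) 1).map (fun i => PySem.Int.toStr (2 * i + 1)))
          (some st.2) (some (st.2 + c))
        let vs := PySem.List.slice
          ((PySem.List.pyRange 0 (T : Int) 1).map (fun i => PySem.Int.toStr (2 * i + 2)))
          (some st.2) (some (st.2 + c))
        (st.1 ++ [(PySem.Dict.ofList (ks.zip vs) : PySem.Dict String String).items], st.2 + c))
      (acc, (off : Int))).1
    = acc ++ specGo ls off := by
  induction ls generalizing acc off with
  | nil => simp [specGo]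
  | cons d ds ih =>
    simp only [List.map_cons, List.foldl_cons, specGo]
    rw [count_eq_length]
    have hle : off + d.length ≤ T := by
      simp only [sumLens, List.map_cons, List.sum_cons] at h; omega
    rw [chunk_slice T off d.length hle]
    have h1 : ((off : Int) + (d.length : Int)) = ((off + d.length : Nat) : Int) := by
      push_cast; ring
    rw [h1, ih (acc ++ _) (off + d.length)
      (by simp only [sumLens, List.map_cons, List.sum_cons] at h ⊢; omega)]
    simp [chunk, PySem.Dict.ofList, PySem.Dict.update]

lemma sum_counts_eq (ls : List (List (String × String))) :
    (ls.map (fun d => d.foldl (fun n _ => n + 1) (0 : Int))).sum = ((sumLens ls : Nat) : Int) := by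
  induction ls with
  | nil => simp [sumLens]
  | cons d ds ih =>
    simp only [List.map_cons, List.sum_cons, count_eq_length, sumLens]
    push_cast
    simp [List.map_map, Function.comp_def]

-- ===== VERDICT (by name: the statement is the Claim_ definition above) =====
theorem fn_hack_10_spec : Claim_equal_fn_hack_10 := by
  intro input_list _
  unfold Spec_fn_hack_10 fn_hack_10 fn_hack_10_alt
  have hA := A_loop input_list [] 0
  simp only [Nat.cast_zero, mul_zero, zero_add] at hA
  rw [hA]
  simp only [sum_counts_eq]
  have hB := B_loop input_list (sumLens input_list) [] 0 (by omega)
  simp only [Nat.cast_zero] at hB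
  rw [hB]
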